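-- pv_equiv track=rewrite | github.com/OTOYO1020/ChatDev_Intermediate | WareHouse/C_159_DefaultOrganization_20250503171904/cuboid_volume_calculator.py | max_volume
-- ===== SOURCE A (Python) =====
-- def max_volume(L):
--     '''
--     Calculates the maximum volume of a cuboid with dimensions a, b, c such that a + b + c = L.
--     The method uses a mathematical approach to find the maximum volume.
--     '''
--     max_volume = 0
--     # Iterate a from 1 to L // 3
--     for a in range(1, L // 3 + 1):
--         b = (L - a) // 2  # Set b to half of the remaining length
--         c = L - a - b  # Calculate c
--         if b > 0 and c > 0:  # Ensure b and c are positive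
--             volume = a * b * c
--             if volume > max_volume:
--                 max_volume = volume
--     return max_volume
-- ===== SOURCE B (Python) =====
-- def max_volume(L):
--     # O(1): the scanned objective a * ((L-a)//2) * ceil((L-a)/2) is nondecreasing
--     # on 1..L//3, so the maximum is attained at a = L//3.
--     a = L // 3
--     if a < 1:
--         return 0
--     b = (L - a) // 2
--     return a * b * (L - a - b)
-- ===== Notes on version B (the rewrite author's own statement) =====
-- stated objective: faster
-- what changed: Replaces the full scan of a in 1..L//3 by the closed-form optimum a = L//3 (the objective is nondecreasing on that range), evaluated once.
import Mathlib
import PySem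

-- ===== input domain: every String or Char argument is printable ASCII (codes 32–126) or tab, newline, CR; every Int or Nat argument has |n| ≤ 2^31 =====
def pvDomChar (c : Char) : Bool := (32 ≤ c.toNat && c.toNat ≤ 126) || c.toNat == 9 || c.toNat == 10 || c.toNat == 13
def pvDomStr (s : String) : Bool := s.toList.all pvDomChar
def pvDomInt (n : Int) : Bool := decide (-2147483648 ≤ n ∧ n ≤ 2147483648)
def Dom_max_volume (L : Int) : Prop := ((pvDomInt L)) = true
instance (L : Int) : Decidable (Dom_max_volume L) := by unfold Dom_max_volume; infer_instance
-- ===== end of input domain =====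

-- B replaces A's O(L) scan of a = 1..L//3 by the single optimum a = L//3 (O(1)):
-- the scanned objective is nondecreasing on that range, which the proof establishes.

-- ===== PORT A =====
def max_volume (L : Int) : Int :=
  (PySem.List.pyRange 1 (PySem.Int.floordiv L 3 + 1) 1).foldl
    (fun mv a =>
      let b := PySem.Int.floordiv (L - a) 2
      let c := L - a - b
      if b > 0 ∧ c > 0 then
        let volume := a * b * c
        if volume > mv then volume else mv
      else mv) 0

-- ===== PORT B =====
def max_volume_alt (L : Int) : Int :=
  let a := PySem.Int.floordiv L 3
  if a < 1 then 0
  else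
    let b := PySem.Int.floordiv (L - a) 2
    a * b * (L - a - b)

-- ===== PRECONDITION & SPEC =====
def Spec_max_volume (L : Int) (out : Int) : Prop := out = max_volume_alt L
instance (L : Int) (out : Int) : Decidable (Spec_max_volume L out) := by unfold Spec_max_volume; infer_instance

-- ===== CLAIM (what is proved, stated in full; the proofs are below) =====
def Claim_equal_max_volume : Prop := ∀ (L : Int), Dom_max_volume L → Spec_max_volume L (max_volume L)

-- ===== LEMMAS AND PROOFS =====

-- the per-a volume scanned by A
def pvVol (L a : Int) : Int :=
  a * PySem.Int.floordiv (L - a) 2 * (L - a - PySem.Int.floordiv (L - a) 2)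

-- A's loop body
def pvStep (L : Int) : Int → Int → Int := fun mv a =>
  let b := PySem.Int.floordiv (L - a) 2
  let c := L - a - b
  if b > 0 ∧ c > 0 then
    let volume := a * b * c
    if volume > mv then volume else mv
  else mv

theorem pvStep_eq (L : Int) :
    max_volume L = (PySem.List.pyRange 1 (PySem.Int.floordiv L 3 + 1) 1).foldl (pvStep L) 0 := rfl

-- inside the scanned range both b and c are positive
theorem pvGuard (L a : Int) (h1 : 1 ≤ a) (h2 : a ≤ PySem.Int.floordiv L 3) :
    0 < PySem.Int.floordiv (L - a) 2 ∧ 0 < L - a - PySem.Int.floordiv (L - a) 2 := by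
  rw [PySem.Int.floordiv_eq_ediv_of_pos (by omega : (0:Int) < 3)] at h2
  rw [PySem.Int.floordiv_eq_ediv_of_pos (by omega : (0:Int) < 2)]
  omega

theorem pvVol_pos (L a : Int) (h1 : 1 ≤ a) (h2 : a ≤ PySem.Int.floordiv L 3) :
    0 < pvVol L a := by
  obtain ⟨hb, hc⟩ := pvGuard L a h1 h2
  exact mul_pos (mul_pos (by omega) hb) hc

-- monotonicity of the objective on the scanned range
theorem pvVol_mono (L a : Int) (h1 : 1 ≤ a) (h2 : a + 1 ≤ PySem.Int.floordiv L 3) :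
    pvVol L a ≤ pvVol L (a + 1) := by
  rw [PySem.Int.floordiv_eq_ediv_of_pos (by omega : (0:Int) < 3)] at h2
  unfold pvVol
  rw [PySem.Int.floordiv_eq_ediv_of_pos (by omega : (0:Int) < 2),
      PySem.Int.floordiv_eq_ediv_of_pos (by omega : (0:Int) < 2)]
  have hm : 2 * a + 3 ≤ L - a := by omega
  rcases Int.even_or_odd (L - a) with ⟨q, hq⟩ | ⟨q, hq⟩
  · have hb1 : (L - a) / 2 = q := by omega
    have hb2 : (L - (a + 1)) / 2 = q - 1 := by omega
    rw [hb1, hb2]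
    nlinarith [mul_nonneg (show (0:ℤ) ≤ q by omega) (show (0:ℤ) ≤ q - a - 1 by omega)]
  · have hb1 : (L - a) / 2 = q := by omega
    have hb2 : (L - (a + 1)) / 2 = q := by omega
    rw [hb1, hb2]
    nlinarith [mul_nonneg (show (0:ℤ) ≤ q by omega) (show (0:ℤ) ≤ q - a by omega)]

-- loop invariant: scanning a = 1..n yields pvVol L n
theorem pvLoop (L : Int) :
    ∀ n : Int, 1 ≤ n → n ≤ PySem.Int.floordiv L 3 →
      (PySem.List.pyRange 1 (n + 1) 1).foldl (pvStep L) 0 = pvVol L n := by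
  intro n hn
  induction n, hn using Int.le_induction with
  | base =>
    intro hle
    rw [PySem.List.pyRange_one_singleton]
    obtain ⟨hb, hc⟩ := pvGuard L 1 le_rfl hle
    have hpos := pvVol_pos L 1 le_rfl hle
    simp only [List.foldl, pvStep, pvVol] at *
    rw [if_pos ⟨hb, hc⟩, if_pos (by linarith)]
  | succ n hn ih =>
    intro hle
    rw [PySem.List.pyRange_one_succ_right (by omega : (1:Int) ≤ n + 1),
        List.foldl_append, ih (by omega)]
    obtain ⟨hb, hc⟩ := pvGuard L (n + 1) (by omega) hle
    have hmono := pvVol_mono L n (by omega) hle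
    simp only [List.foldl, pvStep]
    rw [if_pos ⟨hb, hc⟩]
    by_cases h : (n + 1) * PySem.Int.floordiv (L - (n + 1)) 2 *
        (L - (n + 1) - PySem.Int.floordiv (L - (n + 1)) 2) > pvVol L n
    · rw [if_pos h]; rfl
    · rw [if_neg h]
      have : pvVol L (n + 1) ≤ pvVol L n := by simpa [pvVol] using not_lt.mp h
      omega

-- ===== VERDICT (by name: the statement is the Claim_ definition above) =====
theorem max_volume_spec : Claim_equal_max_volume := by
  intro L _
  unfold Spec_max_volume max_volume_alt
  by_cases h : PySem.Int.floordiv L 3 < 1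
  · rw [pvStep_eq, PySem.List.pyRange_one_eq_nil (by omega)]
    simp only [List.foldl_nil]
    rw [if_pos h]
  · rw [pvStep_eq, pvLoop L (PySem.Int.floordiv L 3) (by omega) le_rfl]
    simp only [pvVol]
    rw [if_neg h]
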